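-- pv_equiv track=rewrite | github.com/DaftFunked/AyED | AyED/Tarea1/B. Reproducción de bichos.py | calcular_bichos
-- ===== SOURCE A (Python) =====
-- def calcular_bichos(N, D):
--     tipoA = N
--     tipoB = 0
--     tipoC = 0
--
--     for _ in range(D):
--         nuevos_tipoA = tipoA
--         nuevos_tipoB = tipoA * 3 + tipoB
--         nuevos_tipoC = tipoA + tipoB * 2 + tipoC
--         nuevos_tipoC += nuevos_tipoA
--
--         tipoA = nuevos_tipoA
--         tipoB = nuevos_tipoB
--         tipoC = nuevos_tipoC
--
--     return tipoA + tipoB + tipoC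
-- ===== SOURCE B (Python) =====
-- def calcular_bichos(N, D):
--     d = D if D > 0 else 0
--     return N * (3 * d * d + 2 * d + 1)
-- ===== Notes on version B (the rewrite author's own statement) =====
-- stated objective: faster
-- what changed: Replaces the D-iteration simulation loop with the closed-form N*(3d^2+2d+1) where d = max(D,0), derived from the arithmetic progressions the loop generates.
import Mathlib
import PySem

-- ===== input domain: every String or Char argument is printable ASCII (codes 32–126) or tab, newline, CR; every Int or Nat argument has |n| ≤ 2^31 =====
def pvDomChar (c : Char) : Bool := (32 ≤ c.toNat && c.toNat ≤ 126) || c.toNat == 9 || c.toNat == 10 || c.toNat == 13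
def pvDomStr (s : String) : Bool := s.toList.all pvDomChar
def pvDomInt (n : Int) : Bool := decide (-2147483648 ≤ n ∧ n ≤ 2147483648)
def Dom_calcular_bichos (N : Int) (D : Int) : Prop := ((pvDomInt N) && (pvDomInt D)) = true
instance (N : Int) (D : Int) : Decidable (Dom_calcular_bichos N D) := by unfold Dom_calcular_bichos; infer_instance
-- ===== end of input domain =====

-- B replaces the O(D) simulation loop by the closed form N*(3d^2+2d+1), d = max(D,0).

-- ===== PORT A =====
-- one loop step over the state (tipoA, tipoB, tipoC)
def calcular_bichos_step (t : Int × Int × Int) : Int × Int × Int :=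
  let nuevos_tipoA := t.1
  let nuevos_tipoB := t.1 * 3 + t.2.1
  let nuevos_tipoC := t.1 + t.2.1 * 2 + t.2.2 + nuevos_tipoA
  (nuevos_tipoA, nuevos_tipoB, nuevos_tipoC)

def calcular_bichos (N : Int) (D : Int) : Int :=
  let s := (PySem.List.pyRange 0 D 1).foldl (fun t _ => calcular_bichos_step t) (N, 0, 0)
  s.1 + s.2.1 + s.2.2

-- ===== PORT B =====
def calcular_bichos_alt (N : Int) (D : Int) : Int :=
  let d := if D > 0 then D else 0
  N * (3 * d * d + 2 * d + 1)

-- ===== PRECONDITION & SPEC =====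
def Spec_calcular_bichos (N : Int) (D : Int) (out : Int) : Prop := out = calcular_bichos_alt N D
instance (N : Int) (D : Int) (out : Int) : Decidable (Spec_calcular_bichos N D out) := by unfold Spec_calcular_bichos; infer_instance

-- ===== CLAIM (what is proved, stated in full; the proofs are below) =====
def Claim_equal_calcular_bichos : Prop := ∀ (N : Int) (D : Int), Dom_calcular_bichos N D → Spec_calcular_bichos N D (calcular_bichos N D)

-- ===== LEMMAS AND PROOFS =====

-- after k steps the state is (N, 3Nk, 2Nk + 3Nk(k-1)); the list's elements are irrelevant
theorem calcular_bichos_foldl (N : Int) (l : List Int) (k : Nat) :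
    l.foldl (fun t _ => calcular_bichos_step t)
      (N, 3 * N * k, 2 * N * k + 3 * N * k * (k - 1))
    = (N, 3 * N * (k + l.length), 2 * N * (k + l.length) + 3 * N * (k + l.length) * ((k : Int) + l.length - 1)) := by
  induction l generalizing k with
  | nil => simp
  | cons x xs ih =>
    simp only [List.foldl_cons, List.length_cons]
    have hstep : calcular_bichos_step (N, 3 * N * k, 2 * N * k + 3 * N * k * (k - 1))
        = (N, 3 * N * ((k : Int) + 1), 2 * N * ((k : Int) + 1) + 3 * N * ((k : Int) + 1) * (((k : Int) + 1) - 1)) := by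
      simp only [calcular_bichos_step]
      simp only [Prod.mk.injEq]
      refine ⟨trivial, ?_, ?_⟩ <;> push_cast <;> ring
    rw [hstep]
    have h1 : ((k : Int) + 1) = ((k + 1 : Nat) : Int) := by push_cast; ring
    rw [h1, ih (k + 1)]
    simp only [Prod.mk.injEq]
    refine ⟨trivial, ?_, ?_⟩ <;> push_cast <;> ring

-- ===== VERDICT (by name: the statement is the Claim_ definition above) =====
theorem calcular_bichos_spec : Claim_equal_calcular_bichos := by
  intro N D _
  unfold Spec_calcular_bichos calcular_bichos calcular_bichos_alt
  have h0 : (N, (0 : Int), (0 : Int)) = (N, 3 * N * (0 : Nat), 2 * N * (0 : Nat) + 3 * N * (0 : Nat) * ((0 : Nat) - 1)) := by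
    simp
  rw [h0, calcular_bichos_foldl N _ 0]
  have hlen : ((PySem.List.pyRange 0 D 1).length : Int) = if D > 0 then D else 0 := by
    rw [PySem.List.length_pyRange_one]
    omega
  simp only [Nat.cast_zero, zero_add, hlen]
  split_ifs <;> ring
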